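-- pv_equiv track=rewrite | github.com/kathrin229/3d-transformer-med-classification | preprocess/data_preprocessing.py | symmetrical_down_sampling
-- ===== SOURCE A (Python) =====
-- def symmetrical_down_sampling(list_dir, num_samples):
--     """
--         Paper strategy 2 (used). Corrected version of strategy described in pseudocode
--         Args:
--             list_dir ([str]): list of directories
--             num_samples (int): number of images to be sampled
--         Returns:
--             list_dir_small ([str]): sampled list of directories
--     """
--     m = len(list_dir)
--     k = int(m/num_samples)
--     if m % 2 == 1:
--         idx = int(m / 2) #CHANGE: not start at index 1 but index in the middle
--     else:
--         idx = int(m / 2)# - 1 #CHANGE: not start at index -1 but at indes in the middle -1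
--     list_indices = []
--     for i in range(num_samples):
--         idx = idx + pow((-1), i) * i * k
--         list_indices.append(idx)
--     list_indices.sort()
--     list_dir_small = [list_dir[i] for i in list_indices]
--     return list_dir_small
-- ===== SOURCE B (Python) =====
-- def symmetrical_down_sampling(list_dir, num_samples):
--     m = len(list_dir)
--     k = int(m / num_samples)  # same computation as A; preserves ZeroDivisionError on num_samples == 0
--     mid = int(m / 2)
--     # closed form, emitted already in sorted order: negatives descending, then mid and positives ascending
--     indices = [mid - j * k for j in range(num_samples // 2, 0, -1)]
--     indices += [mid + j * k for j in range((num_samples + 1) // 2)]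
--     return [list_dir[i] for i in indices]
-- ===== Notes on version B (the rewrite author's own statement) =====
-- stated objective: simpler
-- what changed: Replaces A's running accumulator (+pow(-1,i) sign flips) followed by an explicit sort with a closed-form per-index formula that emits the symmetric indices already in sorted order (negatives descending, then mid and positives ascending), removing both the mutable accumulator and the O(n log n) .sort() pass.
import Mathlib
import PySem

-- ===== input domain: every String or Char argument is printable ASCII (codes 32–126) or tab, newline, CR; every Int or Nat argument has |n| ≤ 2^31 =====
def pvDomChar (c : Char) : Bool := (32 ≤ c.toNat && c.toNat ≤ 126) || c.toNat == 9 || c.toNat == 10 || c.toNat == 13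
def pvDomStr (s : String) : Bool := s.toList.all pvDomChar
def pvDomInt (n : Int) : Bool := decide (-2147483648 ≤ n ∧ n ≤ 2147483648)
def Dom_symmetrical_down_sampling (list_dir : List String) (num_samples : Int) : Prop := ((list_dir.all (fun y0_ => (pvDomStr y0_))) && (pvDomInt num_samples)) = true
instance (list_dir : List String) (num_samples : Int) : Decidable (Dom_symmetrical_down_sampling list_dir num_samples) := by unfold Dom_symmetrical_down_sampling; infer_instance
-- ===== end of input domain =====

-- B replaces A's running accumulator + sort by emitting the symmetric indices directly in sorted
-- order from a closed form (objective: simpler — no mutation, no sort pass).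
-- int(m/num_samples) is ported as truncating integer division (exact for |m|,|num_samples| < 2^53).

-- ===== PORT A =====
def symmetrical_down_sampling (list_dir : List String) (num_samples : Int) : List String :=
  let m : Int := PySem.List.len list_dir
  let k : Int := PySem.Int.truncdiv m num_samples
  let idx : Int := if PySem.Int.mod m 2 == 1 then PySem.Int.truncdiv m 2 else PySem.Int.truncdiv m 2
  -- for i in range(num_samples): idx = idx + pow(-1, i) * i * k ; list_indices.append(idx)
  -- (i ≥ 0 for every i the loop visits, so pow(-1, i) is (-1)^i.toNat)
  let st := (PySem.List.pyRange 0 num_samples 1).foldl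
      (fun (s : Int × List Int) i => (s.1 + (-1) ^ i.toNat * i * k, s.2 ++ [s.1 + (-1) ^ i.toNat * i * k]))
      (idx, [])
  let list_indices := PySem.List.sorted st.2 (fun x => x) false
  list_indices.map (fun i => PySem.List.pyGetD list_dir i "")

-- ===== PORT B =====
def symmetrical_down_sampling_alt (list_dir : List String) (num_samples : Int) : List String :=
  let m : Int := PySem.List.len list_dir
  let k : Int := PySem.Int.truncdiv m num_samples
  let mid : Int := PySem.Int.truncdiv m 2
  let indices :=
    (PySem.List.pyRange (PySem.Int.floordiv num_samples 2) 0 (-1)).map (fun j => mid - j * k)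
    ++ (PySem.List.pyRange 0 (PySem.Int.floordiv (num_samples + 1) 2) 1).map (fun j => mid + j * k)
  indices.map (fun i => PySem.List.pyGetD list_dir i "")

-- ===== PRECONDITION & SPEC =====
-- Pre_ excludes num_samples = 0 (ZeroDivisionError) and the inputs whose extreme sampled index
-- falls outside [-m, m) (IndexError in the final comprehension); A returns on exactly Pre_.
def Pre_symmetrical_down_sampling (list_dir : List String) (num_samples : Int) : Prop :=
  num_samples ≠ 0 ∧
  (num_samples < 0 ∨
    (-(list_dir.length : Int) ≤ Int.tdiv (list_dir.length : Int) 2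
        - Int.tdiv num_samples 2 * Int.tdiv (list_dir.length : Int) num_samples ∧
     Int.tdiv (list_dir.length : Int) 2
        + Int.tdiv (num_samples - 1) 2 * Int.tdiv (list_dir.length : Int) num_samples
        < (list_dir.length : Int)))
instance (list_dir : List String) (num_samples : Int) : Decidable (Pre_symmetrical_down_sampling list_dir num_samples) := by unfold Pre_symmetrical_down_sampling; infer_instance
def pvWitness_symmetrical_down_sampling : List String × Int := (["a", "b", "c"], 2)
def Spec_symmetrical_down_sampling (list_dir : List String) (num_samples : Int) (out : List String) : Prop := out = symmetrical_down_sampling_alt list_dir num_samples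
instance (list_dir : List String) (num_samples : Int) (out : List String) : Decidable (Spec_symmetrical_down_sampling list_dir num_samples out) := by unfold Spec_symmetrical_down_sampling; infer_instance

-- ===== CLAIM (what is proved, stated in full; the proofs are below) =====
def Claim_equal_symmetrical_down_sampling : Prop := ∀ (list_dir : List String) (num_samples : Int), Dom_symmetrical_down_sampling list_dir num_samples → Pre_symmetrical_down_sampling list_dir num_samples → Spec_symmetrical_down_sampling list_dir num_samples (symmetrical_down_sampling list_dir num_samples)

-- ===== LEMMAS AND PROOFS =====

-- the offset added to mid by A's accumulator after step i : 0, -k, +k, -2k, +2k, …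
def pvOff (k : Int) (i : Nat) : Int := (-1) ^ i * (((i + 1) / 2 : Nat) : Int) * k
-- A's (unsorted) index list
def pvAList (mid k : Int) (n : Nat) : List Int := (List.range n).map (fun i => mid + pvOff k i)
-- B's two halves
def pvNegs (mid k : Int) (q : Nat) : List Int := (List.range q).map (fun (t : Nat) => mid - ((q : Int) - (t : Int)) * k)
def pvPoss (mid k : Int) (p : Nat) : List Int := (List.range p).map (fun (j : Nat) => mid + (j : Int) * k)

lemma pvOff_rec (k : Int) (n : Nat) : pvOff k (n - 1) + (-1) ^ n * (n : Int) * k = pvOff k n := by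
  rcases n with _ | t
  · simp [pvOff]
  · simp only [Nat.add_sub_cancel, pvOff]
    rcases Nat.even_or_odd t with ⟨s, hs⟩ | ⟨s, hs⟩ <;> subst hs
    · have e1 : ((s + s + 1) / 2 : Nat) = s := by omega
      have e2 : ((s + s + 1 + 1) / 2 : Nat) = s + 1 := by omega
      rw [e1, e2, Even.neg_one_pow ⟨s, rfl⟩, Odd.neg_one_pow ⟨s, by ring⟩]
      push_cast
      ring
    · have e1 : ((2 * s + 1 + 1) / 2 : Nat) = s + 1 := by omega
      have e2 : ((2 * s + 1 + 1 + 1) / 2 : Nat) = s + 1 := by omega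
      rw [e1, e2, Odd.neg_one_pow ⟨s, by ring⟩, Even.neg_one_pow ⟨s + 1, by ring⟩]
      push_cast
      ring

lemma pvAList_succ (mid k : Int) (n : Nat) :
    pvAList mid k (n + 1) = pvAList mid k n ++ [mid + pvOff k n] := by
  simp [pvAList, List.range_succ]

lemma pvFoldA (mid k : Int) (n : Nat) :
    (PySem.List.pyRange 0 (n : Int) 1).foldl
      (fun (s : Int × List Int) i => (s.1 + (-1) ^ i.toNat * i * k, s.2 ++ [s.1 + (-1) ^ i.toNat * i * k]))
      (mid, []) = (mid + pvOff k (n - 1), pvAList mid k n) := by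
  induction n with
  | zero => simp [pvOff, pvAList, PySem.List.pyRange_one_eq_nil]
  | succ t ih =>
    have hsplit : PySem.List.pyRange 0 ((t : Int) + 1) 1
        = PySem.List.pyRange 0 (t : Int) 1 ++ [(t : Int)] := by
      exact PySem.List.pyRange_one_succ_right (by positivity)
    have hc : ((t + 1 : Nat) : Int) = (t : Int) + 1 := by push_cast; ring
    rw [hc, hsplit, List.foldl_append, ih]
    simp only [List.foldl_cons, List.foldl_nil, Int.toNat_natCast, Nat.add_sub_cancel,
      Prod.mk.injEq]
    have hrec := pvOff_rec k t
    refine ⟨by linarith [hrec], ?_⟩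
    rw [pvAList_succ]
    congr 2
    linarith [hrec]

lemma pvNegs_succ (mid k : Int) (q : Nat) :
    pvNegs mid k (q + 1) = (mid - ((q : Int) + 1) * k) :: pvNegs mid k q := by
  unfold pvNegs
  rw [List.range_succ_eq_map, List.map_cons, List.map_map]
  refine congrArg₂ List.cons (by push_cast; ring) ?_
  apply List.map_congr_left
  intro t _
  simp only [Function.comp_apply]
  push_cast
  ring

lemma pvPoss_succ (mid k : Int) (p : Nat) :
    pvPoss mid k (p + 1) = pvPoss mid k p ++ [mid + (p : Int) * k] := by
  simp [pvPoss, List.range_succ]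

lemma pvPerm (mid k : Int) (n : Nat) :
    (pvNegs mid k (n / 2) ++ pvPoss mid k ((n + 1) / 2)).Perm (pvAList mid k n) := by
  induction n with
  | zero => simp [pvNegs, pvPoss, pvAList]
  | succ t ih =>
    rw [pvAList_succ]
    rcases Nat.even_or_odd t with ⟨s, rfl⟩ | ⟨s, rfl⟩
    · -- t = s + s even: positive half grows at its end
      rw [show (s + s) / 2 = s from by omega, show (s + s + 1) / 2 = s from by omega] at ih
      rw [show (s + s + 1) / 2 = s from by omega,
        show (s + s + 1 + 1) / 2 = s + 1 from by omega, pvPoss_succ]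
      have hoff : mid + pvOff k (s + s) = mid + (s : Int) * k := by
        simp only [pvOff]
        rw [show ((s + s + 1) / 2 : Nat) = s from by omega, Even.neg_one_pow ⟨s, rfl⟩]
        ring
      rw [hoff, ← List.append_assoc]
      exact List.Perm.append ih (List.Perm.refl _)
    · -- t = 2s + 1 odd: negative half grows at its front
      rw [show (2 * s + 1) / 2 = s from by omega,
        show (2 * s + 1 + 1) / 2 = s + 1 from by omega] at ih
      rw [show (2 * s + 1 + 1) / 2 = s + 1 from by omega,
        show (2 * s + 1 + 1 + 1) / 2 = s + 1 from by omega, pvNegs_succ]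
      have hoff : mid + pvOff k (2 * s + 1) = mid - ((s : Int) + 1) * k := by
        simp only [pvOff]
        rw [show ((2 * s + 1 + 1) / 2 : Nat) = s + 1 from by omega, Odd.neg_one_pow ⟨s, by ring⟩]
        push_cast
        ring
      rw [hoff, List.cons_append]
      exact List.Perm.trans (List.Perm.cons _ ih) (List.perm_append_singleton _ _).symm

lemma pvPairwise (mid k : Int) (hk : 0 ≤ k) (q p : Nat) :
    (pvNegs mid k q ++ pvPoss mid k p).Pairwise (· ≤ ·) := by
  rw [List.pairwise_append]
  refine ⟨?_, ?_, ?_⟩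
  · simp only [pvNegs, List.pairwise_map]
    refine List.Pairwise.imp ?_ (List.pairwise_lt_range (n := q))
    intro a b hab
    have h1 : ((q : Int) - b) * k ≤ ((q : Int) - a) * k :=
      mul_le_mul_of_nonneg_right (by omega) hk
    omega
  · simp only [pvPoss, List.pairwise_map]
    refine List.Pairwise.imp ?_ (List.pairwise_lt_range (n := p))
    intro a b hab
    have h1 : (a : Int) * k ≤ (b : Int) * k :=
      mul_le_mul_of_nonneg_right (by exact_mod_cast Nat.le_of_lt hab) hk
    omega
  · intro x hx y hy
    simp only [pvNegs, List.mem_map, List.mem_range] at hx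
    simp only [pvPoss, List.mem_map, List.mem_range] at hy
    obtain ⟨t, ht, rfl⟩ := hx
    obtain ⟨j, hj, rfl⟩ := hy
    have h1 : 0 ≤ ((q : Int) - t) * k := mul_nonneg (by omega) hk
    have h2 : 0 ≤ (j : Int) * k := mul_nonneg (by positivity) hk
    omega

lemma pvSortedMain (mid k : Int) (hk : 0 ≤ k) (n : Nat) :
    PySem.List.sorted (pvAList mid k n) (fun x => x) false
      = pvNegs mid k (n / 2) ++ pvPoss mid k ((n + 1) / 2) :=
  PySem.List.sorted_id_eq_of_perm_of_pairwise _ _ (pvPerm mid k n) (pvPairwise mid k hk _ _)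

-- B's index expression, for a positive num_samples n, is exactly pvNegs ++ pvPoss
lemma pvBIndices (mid k : Int) (n : Nat) :
    (PySem.List.pyRange (PySem.Int.floordiv (n : Int) 2) 0 (-1)).map (fun j => mid - j * k)
      ++ (PySem.List.pyRange 0 (PySem.Int.floordiv ((n : Int) + 1) 2) 1).map (fun j => mid + j * k)
      = pvNegs mid k (n / 2) ++ pvPoss mid k ((n + 1) / 2) := by
  have h2 : PySem.Int.floordiv (n : Int) 2 = ((n / 2 : Nat) : Int) := by
    exact_mod_cast PySem.Int.floordiv_natCast n 2
  have h3 : PySem.Int.floordiv ((n : Int) + 1) 2 = (((n + 1) / 2 : Nat) : Int) := by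
    have : ((n : Int) + 1) = ((n + 1 : Nat) : Int) := by push_cast; ring
    rw [this]
    exact_mod_cast PySem.Int.floordiv_natCast (n + 1) 2
  rw [h2, h3, PySem.List.pyRange_neg_one, PySem.List.pyRange_one]
  congr 1
  · simp only [Int.sub_zero, Int.toNat_natCast, List.map_map, pvNegs]
    apply List.map_congr_left
    intro t _
    simp [Function.comp]
  · simp only [Int.sub_zero, Int.toNat_natCast, List.map_map, pvPoss]
    apply List.map_congr_left
    intro t _
    simp [Function.comp]

-- ===== VERDICT (by name: the statement is the Claim_ definition above) =====
theorem symmetrical_down_sampling_spec : Claim_equal_symmetrical_down_sampling := by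
  intro list_dir num_samples _hdom hpre
  unfold Spec_symmetrical_down_sampling
  unfold symmetrical_down_sampling symmetrical_down_sampling_alt
  simp only [PySem.List.len_eq, ite_self]
  rcases lt_or_gt_of_ne hpre.1 with hneg | hpos
  · -- num_samples < 0 : both comprehensions are empty
    have hA : PySem.List.pyRange 0 num_samples 1 = [] :=
      PySem.List.pyRange_one_eq_nil (le_of_lt hneg)
    have hB1 : PySem.List.pyRange (PySem.Int.floordiv num_samples 2) 0 (-1) = [] := by
      apply PySem.List.pyRange_neg_one_eq_nil
      rw [PySem.Int.floordiv_eq_ediv_of_pos (by norm_num)]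
      omega
    have hB2 : PySem.List.pyRange 0 (PySem.Int.floordiv (num_samples + 1) 2) 1 = [] := by
      apply PySem.List.pyRange_one_eq_nil
      rw [PySem.Int.floordiv_eq_ediv_of_pos (by norm_num)]
      omega
    rw [hA, hB1, hB2]
    simp [PySem.List.sorted]
  · -- 0 < num_samples
    obtain ⟨n, rfl⟩ : ∃ n : Nat, num_samples = (n : Int) :=
      ⟨num_samples.toNat, (Int.toNat_of_nonneg (le_of_lt hpos)).symm⟩
    have hk : 0 ≤ PySem.Int.truncdiv ((list_dir.length : Int)) ((n : Int)) := by
      show 0 ≤ Int.tdiv _ _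
      exact Int.tdiv_nonneg (by positivity) (by positivity)
    rw [pvFoldA, pvSortedMain _ _ hk, pvBIndices]
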